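-- pv_equiv track=rewrite | github.com/benrich37/ultraSoftCrawfish | helpers/data_parsers.py | orbs_idx_dict_helper
-- ===== SOURCE A (Python) =====
-- def orbs_idx_dict_helper(ion_names, ion_counts, nOrbsPerAtom):
--     # Helper function for orbs_idx_dict function
--     orbs_dict_out = {}
--     iOrb = 0
--     atom = 0
--     for i, count in enumerate(ion_counts):
--         for atom_num in range(count):
--             atom_label = ion_names[i] + ' #' + str(atom_num + 1)
--             norbs = nOrbsPerAtom[atom]
--             orbs_dict_out[atom_label] = list(range(iOrb, iOrb + norbs))
--             iOrb += norbs
--             atom += 1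
--     return orbs_dict_out
-- ===== SOURCE B (Python) =====
-- def orbs_idx_dict_helper(ion_names, ion_counts, nOrbsPerAtom):
--     # Divide and conquer over the ion list: each node returns (pairs, atoms used,
--     # orbitals used) for its half; halves are combined by offsetting the right one.
--     # A single dict() at the end builds the result from the pair list.
--     def build(lo, hi, atom0, orb0):
--         # entries for ions lo..hi-1, first atom index atom0, first orbital orb0
--         if hi - lo == 1:
--             c = ion_counts[lo]
--             pairs = []
--             pos = orb0
--             na = 0
--             for k in range(c):
--                 n = nOrbsPerAtom[atom0 + k]
--                 pairs.append((ion_names[lo] + ' #' + str(k + 1),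
--                               list(range(pos, pos + n))))
--                 pos += n
--                 na += 1
--             return pairs, na, pos - orb0
--         mid = (lo + hi) // 2
--         lp, la, lorbs = build(lo, mid, atom0, orb0)
--         rp, ra, rorbs = build(mid, hi, atom0 + la, orb0 + lorbs)
--         lp.extend(rp)
--         return lp, la + ra, lorbs + rorbs
--     if not ion_counts:
--         return {}
--     pairs, _, _ = build(0, len(ion_counts), 0, 0)
--     return dict(pairs)
-- ===== Notes on version B (the rewrite author's own statement) =====
-- stated objective: alternative
-- what changed: A's fused nested loop with global running iOrb/atom counters inserting into a dict is replaced by a divide-and-conquer recursion over the ion list: each half returns its entry pairs together with the atoms and orbitals it consumed, the right half is built with the offsets returned by the left, and one dict() call at the end builds the result.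
import Mathlib
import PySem

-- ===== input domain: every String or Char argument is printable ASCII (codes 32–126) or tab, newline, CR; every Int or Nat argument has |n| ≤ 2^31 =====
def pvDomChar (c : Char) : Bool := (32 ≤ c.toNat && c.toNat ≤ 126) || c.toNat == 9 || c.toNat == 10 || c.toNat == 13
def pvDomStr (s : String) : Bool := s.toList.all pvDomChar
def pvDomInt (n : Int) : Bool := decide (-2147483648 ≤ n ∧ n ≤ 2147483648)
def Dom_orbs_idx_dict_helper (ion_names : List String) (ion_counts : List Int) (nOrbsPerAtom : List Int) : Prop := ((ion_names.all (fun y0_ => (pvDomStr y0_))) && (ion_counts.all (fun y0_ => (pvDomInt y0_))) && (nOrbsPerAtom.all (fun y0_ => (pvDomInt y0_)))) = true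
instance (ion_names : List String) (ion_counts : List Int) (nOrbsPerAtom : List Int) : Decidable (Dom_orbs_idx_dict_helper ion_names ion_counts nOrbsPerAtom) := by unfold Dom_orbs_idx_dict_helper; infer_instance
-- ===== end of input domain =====

-- B replaces A's fused nested loop with global running counters by a divide-and-conquer
-- recursion over the ion list, combining each half via the atom/orbital totals the left
-- half returns, and building the dict once at the end; alternative decomposition.

-- ===== PORT A =====
-- Fused nested loop, state (dict, iOrb, atom); pyGetD is used where Python indexes
-- (Pre_ keeps every index in range, so the defaults are never read on admitted inputs).
def orbs_idx_dict_helper (ion_names : List String) (ion_counts : List Int) (nOrbsPerAtom : List Int) : List (String × List Int) :=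
  let st := (PySem.List.enumerate ion_counts 0).foldl
    (fun (st : PySem.Dict String (List Int) × Int × Int) ic =>
      (PySem.List.pyRange 0 ic.2 1).foldl
        (fun (st : PySem.Dict String (List Int) × Int × Int) atom_num =>
          let atom_label := PySem.List.pyGetD ion_names ic.1 "" ++ " #" ++ PySem.Int.toStr (atom_num + 1)
          let norbs := PySem.List.pyGetD nOrbsPerAtom st.2.2 0
          (st.1.insert atom_label (PySem.List.pyRange st.2.1 (st.2.1 + norbs) 1),
           st.2.1 + norbs, st.2.2 + 1))
        st)
    (PySem.Dict.empty, 0, 0)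
  st.1.items

-- ===== PORT B =====
-- build(lo, hi, atom0, orb0): divide-and-conquer node returning (pairs, atoms used,
-- orbitals used) for ions lo..hi-1.  The fuel argument and the 'hi - lo ≤ 0' branch are
-- totality guards only: Python always calls build with 1 ≤ hi - lo ≤ fuel, where they
-- are never consulted.
def pvBuild (names : List String) (counts : List Int) (nOrbs : List Int) : Nat → Int → Int → Int → Int → List (String × List Int) × Int × Int
  | 0, _, _, _, _ => ([], 0, 0)
  | fuel + 1, lo, hi, atom0, orb0 =>
    if hi - lo ≤ 0 then ([], 0, 0)
    else if hi - lo == 1 then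
      let c := PySem.List.pyGetD counts lo 0
      let st := (PySem.List.pyRange 0 c 1).foldl
        (fun (st : List (String × List Int) × Int × Int) k =>
          let n := PySem.List.pyGetD nOrbs (atom0 + k) 0
          (st.1 ++ [(PySem.List.pyGetD names lo "" ++ " #" ++ PySem.Int.toStr (k + 1),
                     PySem.List.pyRange st.2.1 (st.2.1 + n) 1)],
           st.2.1 + n, st.2.2 + 1))
        ([], orb0, 0)
      (st.1, st.2.2, st.2.1 - orb0)
    else
      let mid := PySem.Int.floordiv (lo + hi) 2
      let L := pvBuild names counts nOrbs fuel lo mid atom0 orb0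
      let R := pvBuild names counts nOrbs fuel mid hi (atom0 + L.2.1) (orb0 + L.2.2)
      (L.1 ++ R.1, L.2.1 + R.2.1, L.2.2 + R.2.2)

-- dict(pairs): fold the pair list into a dict once, then its items.
def orbs_idx_dict_helper_alt (ion_names : List String) (ion_counts : List Int) (nOrbsPerAtom : List Int) : List (String × List Int) :=
  if ion_counts.isEmpty then (PySem.Dict.empty : PySem.Dict String (List Int)).items
  else
    ((pvBuild ion_names ion_counts nOrbsPerAtom ion_counts.length 0 (ion_counts.length : Int) 0 0).1.foldl
      (fun (d : PySem.Dict String (List Int)) p => d.insert p.1 p.2) PySem.Dict.empty).items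

-- ===== PRECONDITION & SPEC =====
-- Pre_ excludes exactly the inputs on which Python A raises IndexError: an ion with a
-- positive count beyond the end of ion_names, or nOrbsPerAtom shorter than the total atom count.
def Pre_orbs_idx_dict_helper (ion_names : List String) (ion_counts : List Int) (nOrbsPerAtom : List Int) : Prop :=
  (∀ k, k < ion_counts.length → 0 < ion_counts.getD k 0 → k < ion_names.length) ∧
  (ion_counts.map Int.toNat).sum ≤ nOrbsPerAtom.length
instance (ion_names : List String) (ion_counts : List Int) (nOrbsPerAtom : List Int) : Decidable (Pre_orbs_idx_dict_helper ion_names ion_counts nOrbsPerAtom) := by unfold Pre_orbs_idx_dict_helper; infer_instance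

def pvWitness_orbs_idx_dict_helper : List String × List Int × List Int := (["H", "O"], [2, 1], [1, 3, 2])

def Spec_orbs_idx_dict_helper (ion_names : List String) (ion_counts : List Int) (nOrbsPerAtom : List Int) (out : List (String × List Int)) : Prop := out = orbs_idx_dict_helper_alt ion_names ion_counts nOrbsPerAtom
instance (ion_names : List String) (ion_counts : List Int) (nOrbsPerAtom : List Int) (out : List (String × List Int)) : Decidable (Spec_orbs_idx_dict_helper ion_names ion_counts nOrbsPerAtom out) := by unfold Spec_orbs_idx_dict_helper; infer_instance

-- ===== CLAIM (what is proved, stated in full; the proofs are below) =====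
def Claim_equal_orbs_idx_dict_helper : Prop := ∀ (ion_names : List String) (ion_counts : List Int) (nOrbsPerAtom : List Int), Dom_orbs_idx_dict_helper ion_names ion_counts nOrbsPerAtom → Pre_orbs_idx_dict_helper ion_names ion_counts nOrbsPerAtom → Spec_orbs_idx_dict_helper ion_names ion_counts nOrbsPerAtom (orbs_idx_dict_helper ion_names ion_counts nOrbsPerAtom)

-- ===== LEMMAS AND PROOFS =====

-- getD through drop
lemma pv_getD_drop {α : Type} (l : List α) (i j : Nat) (d : α) :
    (l.drop i).getD j d = l.getD (i + j) d := by
  simp [List.getD_eq_getElem?_getD, List.getElem?_drop]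

-- the entry list of one ion: name nm, atom numbers j+1, j+2, …, consecutive ranges from pos
def pvSeg (nm : String) : List Int → Int → Int → List (String × List Int)
  | [], _, _ => []
  | n :: t, j, pos =>
      (nm ++ " #" ++ PySem.Int.toStr (j + 1), PySem.List.pyRange pos (pos + n) 1) ::
        pvSeg nm t (j + 1) (pos + n)

lemma pvSeg_append_singleton (nm : String) (hd : List Int) (x : Int) :
    ∀ (j pos : Int), pvSeg nm (hd ++ [x]) j pos =
      pvSeg nm hd j pos ++
        [(nm ++ " #" ++ PySem.Int.toStr (j + hd.length + 1),
          PySem.List.pyRange (pos + hd.sum) (pos + hd.sum + x) 1)] := by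
  induction hd with
  | nil => intro j pos; simp [pvSeg]
  | cons n t ih =>
      intro j pos
      simp only [List.cons_append, pvSeg, ih, List.length_cons, List.sum_cons]
      have h1 : j + 1 + (t.length : Int) + 1 = j + ((t.length + 1 : Nat) : Int) + 1 := by
        push_cast; ring
      have h2 : pos + n + t.sum = pos + (n + t.sum) := by ring
      rw [h1, h2]

-- the n orbital counts of one ion, read from nOrbs starting at atom index a0
def pvHd (nOrbs : List Int) (a0 n : Nat) : List Int :=
  (List.range n).map (fun k => nOrbs.getD (a0 + k) 0)

lemma pvHd_succ (nOrbs : List Int) (a0 n : Nat) :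
    pvHd nOrbs a0 (n + 1) = pvHd nOrbs a0 n ++ [nOrbs.getD (a0 + n) 0] := by
  simp [pvHd, List.range_succ]

lemma pvHd_length (nOrbs : List Int) (a0 n : Nat) : (pvHd nOrbs a0 n).length = n := by
  simp [pvHd]

-- A's inner loop over range(c), from atom index a0 and position o
lemma pv_innerA (nm : String) (nOrbs : List Int) (n : Nat) :
    ∀ (a0 : Nat) (o : Int) (d : PySem.Dict String (List Int)),
      (PySem.List.pyRange 0 ((n : Nat) : Int) 1).foldl
        (fun (st : PySem.Dict String (List Int) × Int × Int) atom_num =>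
          let atom_label := nm ++ " #" ++ PySem.Int.toStr (atom_num + 1)
          let norbs := PySem.List.pyGetD nOrbs st.2.2 0
          (st.1.insert atom_label (PySem.List.pyRange st.2.1 (st.2.1 + norbs) 1),
           st.2.1 + norbs, st.2.2 + 1))
        (d, o, (a0 : Int)) =
      ((pvSeg nm (pvHd nOrbs a0 n) 0 o).foldl (fun d p => d.insert p.1 p.2) d,
       o + (pvHd nOrbs a0 n).sum, ((a0 + n : Nat) : Int)) := by
  induction n with
  | zero =>
      intro a0 o d
      rw [show (((0 : Nat) : Int)) = (0 : Int) by rfl,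
        PySem.List.pyRange_one_eq_nil (le_refl 0)]
      simp [pvHd, pvSeg]
  | succ n ih =>
      intro a0 o d
      rw [show (((n + 1 : Nat) : Int)) = ((n : Int) + 1) by push_cast; ring,
        PySem.List.pyRange_one_succ_right (by positivity), List.foldl_append, ih a0 o d]
      simp only [List.foldl_cons, List.foldl_nil]
      have hget : PySem.List.pyGetD nOrbs ((a0 + n : Nat) : Int) 0 = nOrbs.getD (a0 + n) 0 :=
        PySem.List.pyGetD_natCast _ _ _
      rw [pvHd_succ, pvSeg_append_singleton, List.foldl_append]
      simp only [List.foldl_cons, List.foldl_nil, Prod.mk.injEq]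
      refine ⟨?_, ?_, by push_cast; ring⟩
      · rw [hget, pvHd_length]; norm_num
      · rw [hget]; simp [List.sum_append]; ring

-- B's inner loop over range(c): pairs, final position and atom count
lemma pv_innerD (nm : String) (nOrbs : List Int) (n : Nat) :
    ∀ (a0 : Nat) (o : Int),
      (PySem.List.pyRange 0 ((n : Nat) : Int) 1).foldl
        (fun (st : List (String × List Int) × Int × Int) k =>
          let n' := PySem.List.pyGetD nOrbs ((a0 : Int) + k) 0
          (st.1 ++ [(nm ++ " #" ++ PySem.Int.toStr (k + 1),
                     PySem.List.pyRange st.2.1 (st.2.1 + n') 1)],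
           st.2.1 + n', st.2.2 + 1))
        ([], o, 0) =
      (pvSeg nm (pvHd nOrbs a0 n) 0 o, o + (pvHd nOrbs a0 n).sum, ((n : Nat) : Int)) := by
  induction n with
  | zero =>
      intro a0 o
      rw [show (((0 : Nat) : Int)) = (0 : Int) by rfl,
        PySem.List.pyRange_one_eq_nil (le_refl 0)]
      simp [pvHd, pvSeg]
  | succ n ih =>
      intro a0 o
      rw [show (((n + 1 : Nat) : Int)) = ((n : Int) + 1) by push_cast; ring,
        PySem.List.pyRange_one_succ_right (by positivity), List.foldl_append, ih a0 o]
      simp only [List.foldl_cons, List.foldl_nil]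
      have hget : PySem.List.pyGetD nOrbs ((a0 : Int) + (n : Int)) 0 = nOrbs.getD (a0 + n) 0 := by
        rw [show ((a0 : Int) + (n : Int)) = ((a0 + n : Nat) : Int) by push_cast; ring]
        exact PySem.List.pyGetD_natCast _ _ _
      rw [pvHd_succ, pvSeg_append_singleton]
      simp only [Prod.mk.injEq]
      refine ⟨?_, ?_, by push_cast⟩
      · rw [hget, pvHd_length]; norm_num
      · rw [hget]; simp [List.sum_append]; ring

-- the linear reference: entry list for the ions of cs, starting at ion index i,
-- atom index a0 and orbital position o
def pvL (names : List String) (nOrbs : List Int) : List Int → Nat → Nat → Int → List (String × List Int)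
  | [], _, _, _ => []
  | c :: cs, i, a0, o =>
      pvSeg (names.getD i "") (pvHd nOrbs a0 c.toNat) 0 o ++
        pvL names nOrbs cs (i + 1) (a0 + c.toNat) (o + (pvHd nOrbs a0 c.toNat).sum)

-- total atom count of a count list
def pvAt (cs : List Int) : Nat := (cs.map Int.toNat).sum

-- the orbital position after processing cs, starting from atom a0 and position o
def pvPos (nOrbs : List Int) : List Int → Nat → Int → Int
  | [], _, o => o
  | c :: rest, a0, o => pvPos nOrbs rest (a0 + c.toNat) (o + (pvHd nOrbs a0 c.toNat).sum)

lemma pvAt_append (xs ys : List Int) : pvAt (xs ++ ys) = pvAt xs + pvAt ys := by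
  simp [pvAt]

lemma pvAt_cons (c : Int) (t : List Int) : pvAt (c :: t) = c.toNat + pvAt t := by
  simp [pvAt]

lemma pvPos_append (nOrbs : List Int) (xs ys : List Int) :
    ∀ (a0 : Nat) (o : Int),
      pvPos nOrbs (xs ++ ys) a0 o = pvPos nOrbs ys (a0 + pvAt xs) (pvPos nOrbs xs a0 o) := by
  induction xs with
  | nil => intro a0 o; simp [pvPos, pvAt]
  | cons c t ih =>
      intro a0 o
      simp only [List.cons_append, pvPos, ih, pvAt_cons, Nat.add_assoc]

lemma pvL_append (names : List String) (nOrbs : List Int) (xs ys : List Int) :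
    ∀ (i a0 : Nat) (o : Int),
      pvL names nOrbs (xs ++ ys) i a0 o =
        pvL names nOrbs xs i a0 o ++
          pvL names nOrbs ys (i + xs.length) (a0 + pvAt xs) (pvPos nOrbs xs a0 o) := by
  induction xs with
  | nil => intro i a0 o; simp [pvL, pvPos, pvAt]
  | cons c t ih =>
      intro i a0 o
      simp only [List.cons_append, pvL, ih, List.append_assoc, List.length_cons,
        pvAt_cons, pvPos]
      rw [show i + 1 + t.length = i + (t.length + 1) by omega,
        show a0 + c.toNat + pvAt t = a0 + (c.toNat + pvAt t) by omega]

-- main invariant for A: the outer fold from (d, o, a0) at ion index i folds the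
-- inserts of the linear entry list into d
lemma pv_main_fold (names : List String) (nOrbs : List Int) (counts : List Int) :
    ∀ (i a0 : Nat) (o : Int) (d : PySem.Dict String (List Int)),
      (PySem.List.enumerate counts (i : Int)).foldl
        (fun (st : PySem.Dict String (List Int) × Int × Int) ic =>
          (PySem.List.pyRange 0 ic.2 1).foldl
            (fun (st : PySem.Dict String (List Int) × Int × Int) atom_num =>
              let atom_label := PySem.List.pyGetD names ic.1 "" ++ " #" ++ PySem.Int.toStr (atom_num + 1)
              let norbs := PySem.List.pyGetD nOrbs st.2.2 0
              (st.1.insert atom_label (PySem.List.pyRange st.2.1 (st.2.1 + norbs) 1),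
               st.2.1 + norbs, st.2.2 + 1))
            st)
        (d, o, (a0 : Int)) =
      ((pvL names nOrbs counts i a0 o).foldl (fun d p => d.insert p.1 p.2) d,
       pvPos nOrbs counts a0 o,
       ((a0 + pvAt counts : Nat) : Int)) := by
  induction counts with
  | nil => intro i a0 o d; simp [PySem.List.enumerate_nil, pvL, pvPos, pvAt]
  | cons c rest ih =>
      intro i a0 o d
      rw [PySem.List.enumerate_cons, List.foldl_cons]
      have hnm : PySem.List.pyGetD names (i : Int) "" = names.getD i "" :=
        PySem.List.pyGetD_natCast _ _ _
      have hrange : PySem.List.pyRange 0 c 1 = PySem.List.pyRange 0 ((c.toNat : Nat) : Int) 1 := by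
        rw [PySem.List.pyRange_one, PySem.List.pyRange_one,
          show (((c.toNat : Nat) : Int) - 0).toNat = (c - 0).toNat by omega]
      simp only [hnm, hrange]
      rw [pv_innerA (names.getD i "") nOrbs c.toNat a0 o d,
        show ((i : Int) + 1) = ((i + 1 : Nat) : Int) by push_cast; ring,
        ih (i + 1) (a0 + c.toNat) _ _]
      have h3 : a0 + pvAt (c :: rest) = a0 + c.toNat + pvAt rest := by
        rw [pvAt_cons]; omega
      simp only [pvL, pvPos, List.foldl_append, h3]

-- main invariant for B: a divide-and-conquer node with enough fuel computes the linear
-- entry list of its count sublist together with its atom and orbital totals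
lemma pv_build_eq (names : List String) (counts : List Int) (nOrbs : List Int) :
    ∀ (fuel : Nat) (lo hi : Int), 0 ≤ lo → (hi - lo).toNat ≤ fuel →
      ∀ (a0 : Nat) (o : Int),
        pvBuild names counts nOrbs fuel lo hi (a0 : Int) o =
          (pvL names nOrbs ((counts.drop lo.toNat).take (hi - lo).toNat) lo.toNat a0 o,
           ((pvAt ((counts.drop lo.toNat).take (hi - lo).toNat) : Nat) : Int),
           pvPos nOrbs ((counts.drop lo.toNat).take (hi - lo).toNat) a0 o - o) := by
  intro fuel
  induction fuel with
  | zero =>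
      intro lo hi hlo hle a0 o
      rw [show (hi - lo).toNat = 0 by omega]
      simp [pvBuild, pvL, pvPos, pvAt]
  | succ fuel ihf =>
    intro lo hi hlo hle a0 o
    rw [pvBuild]
    split_ifs with h1 h2
    · -- empty span
      rw [show (hi - lo).toNat = 0 by omega]
      simp [pvL, pvPos, pvAt]
    · -- single ion
      have hbeq : hi - lo = 1 := by exact_mod_cast beq_iff_eq.mp h2
      rw [show (hi - lo).toNat = 1 by omega]
      have hc : PySem.List.pyGetD counts lo 0 = counts.getD lo.toNat 0 := by
        rw [show lo = ((lo.toNat : Nat) : Int) by omega]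
        exact PySem.List.pyGetD_natCast _ _ _
      have hn : PySem.List.pyGetD names lo "" = names.getD lo.toNat "" := by
        rw [show lo = ((lo.toNat : Nat) : Int) by omega]
        exact PySem.List.pyGetD_natCast _ _ _
      have hrange : PySem.List.pyRange 0 (PySem.List.pyGetD counts lo 0) 1 =
          PySem.List.pyRange 0 (((counts.getD lo.toNat 0).toNat : Nat) : Int) 1 := by
        rw [hc, PySem.List.pyRange_one, PySem.List.pyRange_one,
          show ((((counts.getD lo.toNat 0).toNat : Nat) : Int) - 0).toNat
            = (counts.getD lo.toNat 0 - 0).toNat by omega]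
      simp only [hn, hrange]
      rw [pv_innerD (names.getD lo.toNat "") nOrbs (counts.getD lo.toNat 0).toNat a0 o]
      rcases hdrop : counts.drop lo.toNat with _ | ⟨c0, tl⟩
      · -- lo is past the end: getD gives 0, both sides are empty
        have hg : counts.getD lo.toNat 0 = 0 := by
          have : counts.length ≤ lo.toNat := by
            by_contra hlt
            have := List.drop_eq_nil_iff.mp hdrop
            omega
          simp [List.getD_eq_getElem?_getD, List.getElem?_eq_none this]
        simp only [hg]
        simp [pvL, pvPos, pvAt, pvHd, pvSeg]
      · -- lo in range: the sublist is [c0] with c0 = counts.getD lo.toNat 0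
        have hg : counts.getD lo.toNat 0 = c0 := by
          have := pv_getD_drop counts lo.toNat 0 (0 : Int)
          rw [hdrop] at this
          simpa using this.symm
        simp only [hg]
        simp [pvL, pvPos, pvAt]
    · -- split at the midpoint
      have hge2 : 2 ≤ hi - lo := by
        have hbne : hi - lo ≠ 1 := by
          intro h; exact h2 (by exact_mod_cast beq_iff_eq.mpr h)
        omega
      set mid := PySem.Int.floordiv (lo + hi) 2 with hmiddef
      have hmid : mid = (lo + hi) / 2 := by
        rw [hmiddef]; exact PySem.Int.floordiv_eq_ediv_of_pos (by norm_num)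
      have hb : lo < mid ∧ mid < hi := by rw [hmid]; omega
      have hlo2 : (0 : Int) ≤ mid := by omega
      set f1 := (mid - lo).toNat with hf1
      set f2 := (hi - mid).toNat with hf2
      have hsum : f1 + f2 = (hi - lo).toNat := by omega
      have hL := ihf lo mid hlo (by omega) a0 o
      dsimp only
      set subL := (counts.drop lo.toNat).take f1 with hsubL
      rw [hL]
      have hcast : ((a0 : Int) + ((pvAt subL : Nat) : Int)) = ((a0 + pvAt subL : Nat) : Int) := by
        push_cast; ring
      have hpos : o + (pvPos nOrbs subL a0 o - o) = pvPos nOrbs subL a0 o := by ring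
      rw [hcast, hpos]
      have hR := ihf mid hi hlo2 (by omega) (a0 + pvAt subL) (pvPos nOrbs subL a0 o)
      rw [hR]
      set subR := (counts.drop mid.toNat).take f2 with hsubR
      have hsplit : (counts.drop lo.toNat).take (hi - lo).toNat = subL ++ subR := by
        rw [← hsum, List.take_add, hsubL, hsubR, List.drop_drop]
        have : lo.toNat + f1 = mid.toNat := by omega
        rw [this]
      rw [hsplit, pvL_append, pvAt_append, pvPos_append]
      simp only [Prod.mk.injEq]
      refine ⟨?_, by push_cast; ring, by ring⟩
      by_cases hlen : subL.length = f1
      · rw [hlen, show lo.toNat + f1 = mid.toNat by omega]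
      · -- counts exhausted before mid: the right sublist is empty
        have hlenle : subL.length < f1 := by
          have := List.length_take_le f1 (counts.drop lo.toNat)
          have h' : subL.length = min f1 (counts.drop lo.toNat).length := by
            rw [hsubL, List.length_take]
          omega
        have hshort : counts.length ≤ mid.toNat := by
          have h' : subL.length = min f1 (counts.drop lo.toNat).length := by
            rw [hsubL, List.length_take]
          rw [List.length_drop] at h'
          omega
        have hRnil : subR = [] := by
          rw [hsubR, List.drop_eq_nil_iff.mpr hshort, List.take_nil]
        rw [hRnil]
        simp [pvL]

-- ===== VERDICT (by name: the statement is the Claim_ definition above) =====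
theorem orbs_idx_dict_helper_spec : Claim_equal_orbs_idx_dict_helper := by
  intro names counts nOrbs _hdom _hpre
  unfold Spec_orbs_idx_dict_helper orbs_idx_dict_helper orbs_idx_dict_helper_alt
  cases counts with
  | nil => simp [PySem.List.enumerate_nil]
  | cons c rest =>
      simp only [List.isEmpty_cons, if_false, Bool.false_eq_true]
      have hA := pv_main_fold names nOrbs (c :: rest) 0 0 0 PySem.Dict.empty
      simp only [Nat.cast_zero] at hA
      rw [hA]
      have hB := pv_build_eq names (c :: rest) nOrbs (c :: rest).length 0
        ((c :: rest).length : Int) (by omega) (by omega) 0 0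
      rw [show ((((c :: rest).length : Int)) - 0).toNat = (c :: rest).length by omega] at hB
      simp only [Nat.cast_zero, Int.toNat_zero, List.drop_zero, List.take_length] at hB
      rw [hB]
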